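-- pv_equiv track=rewrite | github.com/joporsch04/Bachelor-thesis | ionModel/python/matrixElements.py | get_hydrogen_states
-- ===== SOURCE A (Python) =====
-- def hydrogen_state_generator(n_max, get_p_states):
--     for n in range(1, n_max + 1):
--         for l in range(0, n):
--             if get_p_states and l != 1 and n != 1:
--                 continue
--             yield (n, l, 0)
--
-- def get_hydrogen_states(maxStates, get_p_states):
--     gen = hydrogen_state_generator(maxStates, get_p_states)
--     states = []
--     for i, state in enumerate(gen):
--         if i >= maxStates:
--             break
--         states.append(state)
--     return states
-- ===== SOURCE B (Python) =====
-- def get_hydrogen_states(maxStates, get_p_states):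
--     if maxStates <= 0:
--         return []
--     if get_p_states:
--         # closed form: the filter admits exactly (1,0,0) and (n,1,0) for n >= 2
--         return [(1, 0, 0)] + [(n, 1, 0) for n in range(2, maxStates + 1)]
--     # index arithmetic: the i-th state (0-based) is (n, i - T(n-1), 0) where
--     # T(n-1) = 0+1+...+(n-1) is the largest triangular number <= i
--     out = []
--     n, base = 1, 0
--     for i in range(maxStates):
--         if i - base >= n:
--             base += n
--             n += 1
--         out.append((n, i - base, 0))
--     return out
-- ===== Notes on version B (the rewrite author's own statement) =====
-- stated objective: alternative
-- what changed: Replaced the generator/consumer (nested n,l loops filtered and enumerated with a break) by a single function: closed-form list construction for the p-state branch and one flat pass over indices with triangular-number arithmetic (running base = T(n-1)) for the unfiltered branch.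
import Mathlib
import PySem

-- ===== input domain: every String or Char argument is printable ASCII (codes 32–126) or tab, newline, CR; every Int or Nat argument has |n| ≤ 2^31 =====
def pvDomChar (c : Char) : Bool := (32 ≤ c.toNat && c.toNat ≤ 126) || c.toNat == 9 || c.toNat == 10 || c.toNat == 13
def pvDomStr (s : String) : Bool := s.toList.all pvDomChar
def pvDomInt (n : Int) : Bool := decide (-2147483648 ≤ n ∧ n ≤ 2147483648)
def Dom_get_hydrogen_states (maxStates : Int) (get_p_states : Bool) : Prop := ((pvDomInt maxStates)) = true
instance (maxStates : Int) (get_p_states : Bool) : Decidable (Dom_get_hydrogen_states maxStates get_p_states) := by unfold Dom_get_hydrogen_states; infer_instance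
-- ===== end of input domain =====

-- B merges the generator/consumer pair into one function: a closed-form list for the
-- p-state branch and a single index pass with triangular-number arithmetic otherwise.

-- ===== PORT A =====
-- The Python generator is LAZY and the consumer loop breaks at i >= maxStates, so the
-- composed program examines yields one by one; ported as one fold threading the consumer
-- state (broken, i, states) through the generator's own loop nest (the 'continue' filter
-- is the generator's, the break/append checks are the consumer's; once broken nothing
-- more is pulled or appended).
def get_hydrogen_states (maxStates : Int) (get_p_states : Bool) : List (Int × Int × Int) :=
  ((PySem.List.pyRange 1 (maxStates + 1) 1).foldl
    (fun (st : Bool × Int × List (Int × Int × Int)) n =>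
      (PySem.List.pyRange 0 n 1).foldl
        (fun (st : Bool × Int × List (Int × Int × Int)) l =>
          if get_p_states && (l != 1) && (n != 1) then st
          else if st.1 then st
          else if st.2.1 ≥ maxStates then (true, st.2.1, st.2.2)
          else (false, st.2.1 + 1, st.2.2 ++ [(n, l, 0)]))
        st)
    (false, 0, [])).2.2

-- ===== PORT B =====
def get_hydrogen_states_alt (maxStates : Int) (get_p_states : Bool) : List (Int × Int × Int) :=
  if maxStates ≤ 0 then []
  else if get_p_states then
    (1, 0, 0) :: (PySem.List.pyRange 2 (maxStates + 1) 1).map (fun n => (n, 1, 0))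
  else
    -- state (n, base, out): base = T(n-1); the i-th state is (n, i - base, 0)
    ((PySem.List.pyRange 0 maxStates 1).foldl
      (fun (st : Int × Int × List (Int × Int × Int)) (i : Int) =>
        let nb := if i - st.2.1 ≥ st.1 then (st.1 + 1, st.2.1 + st.1) else (st.1, st.2.1)
        (nb.1, nb.2, st.2.2 ++ [(nb.1, i - nb.2, 0)]))
      (1, 0, [])).2.2

-- ===== PRECONDITION & SPEC =====
def Spec_get_hydrogen_states (maxStates : Int) (get_p_states : Bool) (out : List (Int × Int × Int)) : Prop := out = get_hydrogen_states_alt maxStates get_p_states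
instance (maxStates : Int) (get_p_states : Bool) (out : List (Int × Int × Int)) : Decidable (Spec_get_hydrogen_states maxStates get_p_states out) := by unfold Spec_get_hydrogen_states; infer_instance

-- ===== CLAIM (what is proved, stated in full; the proofs are below) =====
def Claim_equal_get_hydrogen_states : Prop := ∀ (maxStates : Int) (get_p_states : Bool), Dom_get_hydrogen_states maxStates get_p_states → Spec_get_hydrogen_states maxStates get_p_states (get_hydrogen_states maxStates get_p_states)

-- ===== LEMMAS AND PROOFS =====

-- proof-side eager reference: the full (finite) yield list of the generator
def eagerGen (n_max : Int) (get_p_states : Bool) : List (Int × Int × Int) :=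
  (PySem.List.pyRange 1 (n_max + 1) 1).foldl (fun states n =>
    (PySem.List.pyRange 0 n 1).foldl (fun states l =>
      if get_p_states && (l != 1) && (n != 1) then states
      else states ++ [(n, l, 0)]) states) []

-- the consumer's per-pull step
def cstep (m : Int) (st : Bool × Int × List (Int × Int × Int)) (x : Int × Int × Int) :
    Bool × Int × List (Int × Int × Int) :=
  if st.1 then st
  else if st.2.1 ≥ m then (true, st.2.1, st.2.2)
  else (false, st.2.1 + 1, st.2.2 ++ [x])

-- a filtered row of the fused fold = consuming the row's eager yield list
lemma foldl_filtered (m : Int) (q : Int → Bool) (f : Int → Int × Int × Int) :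
    ∀ (xs : List Int) (st : Bool × Int × List (Int × Int × Int)) (acc : List (Int × Int × Int)),
    xs.foldl (fun st l => if q l then st else cstep m st (f l)) (acc.foldl (cstep m) st)
      = (xs.foldl (fun ys l => if q l then ys else ys ++ [f l]) acc).foldl (cstep m) st := by
  intro xs
  induction xs with
  | nil => intro st acc; rfl
  | cons x xs ih =>
    intro st acc
    by_cases hq : q x
    · simp only [List.foldl_cons, if_pos hq]
      exact ih st acc
    · simp only [List.foldl_cons, if_neg hq]
      rw [show cstep m (acc.foldl (cstep m) st) (f x) = (acc ++ [f x]).foldl (cstep m) st by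
        rw [List.foldl_append]; rfl]
      exact ih st (acc ++ [f x])

-- the whole fused fold = consuming the eager generator list
lemma fused_eq_consume (m : Int) (p : Bool) :
    ∀ (ns : List Int) (st : Bool × Int × List (Int × Int × Int)) (acc : List (Int × Int × Int)),
    ns.foldl (fun st n =>
        (PySem.List.pyRange 0 n 1).foldl
          (fun (st : Bool × Int × List (Int × Int × Int)) l =>
            if p && (l != 1) && (n != 1) then st
            else if st.1 then st
            else if st.2.1 ≥ m then (true, st.2.1, st.2.2)
            else (false, st.2.1 + 1, st.2.2 ++ [(n, l, 0)]))
          st) (acc.foldl (cstep m) st)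
      = (ns.foldl (fun states n =>
          (PySem.List.pyRange 0 n 1).foldl (fun states l =>
            if p && (l != 1) && (n != 1) then states
            else states ++ [(n, l, 0)]) states) acc).foldl (cstep m) st := by
  intro ns
  induction ns with
  | nil => intro st acc; rfl
  | cons n ns ih =>
    intro st acc
    simp only [List.foldl_cons]
    rw [show (PySem.List.pyRange 0 n 1).foldl
          (fun (st : Bool × Int × List (Int × Int × Int)) l =>
            if p && (l != 1) && (n != 1) then st
            else if st.1 then st
            else if st.2.1 ≥ m then (true, st.2.1, st.2.2)
            else (false, st.2.1 + 1, st.2.2 ++ [(n, l, 0)]))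
          (acc.foldl (cstep m) st)
        = ((PySem.List.pyRange 0 n 1).foldl (fun ys l =>
            if p && (l != 1) && (n != 1) then ys else ys ++ [(n, l, 0)]) acc).foldl (cstep m) st
      from foldl_filtered m _ _ _ st acc]
    exact ih st _

-- reference stream: specW k n l = the next k states starting at row n, column l (l = n means "wrap pending")
def specW : Nat → Int → Int → List (Int × Int × Int)
  | 0, _, _ => []
  | k+1, n, l => if l = n then (n+1, 0, 0) :: specW k (n+1) 1 else (n, l, 0) :: specW k n (l+1)

def row (n : Int) : List (Int × Int × Int) := (PySem.List.pyRange 0 n 1).map (fun l => (n, l, 0))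

-- once broken, consuming is the identity
lemma brokenFold (m : Int) (xs : List (Int × Int × Int)) (i : Int) (acc : List (Int × Int × Int)) :
    xs.foldl (cstep m) (true, i, acc) = (true, i, acc) := by
  induction xs with
  | nil => rfl
  | cons x xs ih => simpa [cstep] using ih

-- consuming with the counter/break is List.take
lemma ctake (m : Int) : ∀ (xs : List (Int × Int × Int)) (i : Int) (acc : List (Int × Int × Int)),
    0 ≤ i → (xs.foldl (cstep m) (false, i, acc)).2.2 = acc ++ xs.take (m - i).toNat := by
  intro xs
  induction xs with
  | nil => intro i acc _; simp
  | cons x xs ih =>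
    intro i acc hi
    rw [List.foldl_cons]
    by_cases h : i ≥ m
    · rw [show cstep m (false, i, acc) x = (true, i, acc) from by simp [cstep, h]]
      rw [brokenFold]
      simp [show (m - i).toNat = 0 from by omega]
    · rw [show cstep m (false, i, acc) x = (false, i + 1, acc ++ [x]) from by simp [cstep, h]]
      rw [ih (i + 1) (acc ++ [x]) (by omega)]
      rw [show (m - i).toNat = (m - (i + 1)).toNat + 1 from by omega]
      simp

lemma A_eq_take (m : Int) (p : Bool) :
    get_hydrogen_states m p = (eagerGen m p).take m.toNat := by
  unfold get_hydrogen_states eagerGen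
  have h := fused_eq_consume m p (PySem.List.pyRange 1 (m + 1) 1) (false, 0, []) []
  simp only [List.foldl_nil] at h
  rw [h, ctake m _ 0 [] le_rfl]
  simp

-- p-branch: the inner loop's value per n
def gP (n : Int) : List (Int × Int × Int) :=
  if n = 1 then [(1, 0, 0)] else if 2 ≤ n then [(n, 1, 0)] else []

lemma skipFold (n : Int) (hn : 2 ≤ n) : ∀ (xs : List Int) (acc : List (Int × Int × Int)),
    (∀ x ∈ xs, 2 ≤ x) →
    xs.foldl (fun states l =>
      if true && (l != 1) && (n != 1) then states else states ++ [(n, l, 0)]) acc = acc := by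
  intro xs
  induction xs with
  | nil => intro acc _; rfl
  | cons x xs ih =>
    intro acc h
    have hx : 2 ≤ x := h x (by simp)
    rw [List.foldl_cons, if_pos (by simp; omega)]
    exact ih acc (fun y hy => h y (by simp [hy]))

lemma innerP (n : Int) (acc : List (Int × Int × Int)) :
    (PySem.List.pyRange 0 n 1).foldl (fun states l =>
      if true && (l != 1) && (n != 1) then states else states ++ [(n, l, 0)]) acc
      = acc ++ gP n := by
  rcases lt_trichotomy n 1 with h | h | h
  · rw [PySem.List.pyRange_one_eq_nil (by omega)]
    simp [gP, show ¬ n = 1 by omega, show ¬ (2:Int) ≤ n by omega]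
  · subst h
    have h01 : PySem.List.pyRange 0 1 1 = [0] := by decide
    rw [h01]
    simp [gP]
  · have h2 : 2 ≤ n := by omega
    rw [PySem.List.pyRange_one_cons (by omega : (0:Int) < n),
        PySem.List.pyRange_one_cons (by omega : (0:Int)+1 < n)]
    rw [List.foldl_cons, if_pos (by simp; omega), List.foldl_cons,
        if_neg (by simp)]
    rw [skipFold n h2 _ _ (fun x hx => by
      have := (PySem.List.mem_pyRange_one.mp hx).1; omega)]
    simp [gP, show ¬ n = 1 by omega, h2]

lemma genP (m : Int) (hm : 1 ≤ m) :
    eagerGen m true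
      = (1, 0, 0) :: (PySem.List.pyRange 2 (m + 1) 1).map (fun n => (n, 1, 0)) := by
  induction m, hm using Int.le_induction with
  | base => decide
  | succ m hm ih =>
    unfold eagerGen at ih ⊢
    rw [PySem.List.pyRange_one_succ_right (by omega : (1:Int) ≤ m + 1), List.foldl_append, ih]
    rw [List.foldl_cons, List.foldl_nil, innerP]
    rw [PySem.List.pyRange_one_succ_right (by omega : (2:Int) ≤ m + 1)]
    simp [gP, show ¬ m + 1 = 1 by omega, show (2:Int) ≤ m + 1 by omega]

lemma genF (m : Int) :
    eagerGen m false = (PySem.List.pyRange 1 (m + 1) 1).flatMap row := by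
  unfold eagerGen
  have h : (fun (states : List (Int × Int × Int)) (n : Int) =>
      (PySem.List.pyRange 0 n 1).foldl (fun states l =>
        if false && (l != 1) && (n != 1) then states else states ++ [(n, l, 0)]) states)
      = fun states n => states ++ row n := by
    funext states n
    simp only [Bool.false_and, if_neg Bool.false_ne_true]
    exact PySem.List.foldl_append_singleton_eq_map _ _ _
  rw [h, PySem.List.foldl_append_eq_flatMap]
  simp

lemma takeSpec : ∀ (k : Nat) (n l b : Int), 1 ≤ n → 0 ≤ l → l ≤ n → n ≤ b →
    2 * (k : Int) ≤ 2 * (n - l) + b * (b + 1) - n * (n + 1) →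
    (((PySem.List.pyRange l n 1).map (fun j => (n, j, 0))
        ++ (PySem.List.pyRange (n + 1) (b + 1) 1).flatMap row).take k) = specW k n l := by
  intro k
  induction k with
  | zero => intro n l b _ _ _ _ _; simp [specW]
  | succ k ih =>
    intro n l b hn hl0 hln hnb hk
    by_cases hl : l = n
    · subst l
      have hk' : 2 * ((k : Int) + 1) ≤ b * (b + 1) - n * (n + 1) := by push_cast at hk; linarith
      have hnb' : n + 1 ≤ b := by
        rcases eq_or_lt_of_le hnb with h | h
        · exfalso; rw [h] at hk'; omega
        · omega
      rw [PySem.List.pyRange_one_eq_nil le_rfl,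
          PySem.List.pyRange_one_cons (by omega : n + 1 < b + 1)]
      simp only [List.map_nil, List.nil_append, List.flatMap_cons]
      have hrow : row (n + 1)
          = (n + 1, 0, 0) :: (PySem.List.pyRange 1 (n + 1) 1).map (fun j => (n + 1, j, 0)) := by
        unfold row
        rw [PySem.List.pyRange_one_cons (by omega : (0:Int) < n + 1)]
        simp
      rw [hrow]
      simp only [List.cons_append, List.take_succ_cons, specW, if_pos rfl]
      congr 1
      have := ih (n + 1) 1 b (by omega) (by omega) (by omega) hnb'
        (by push_cast; nlinarith)
      exact this
    · rw [PySem.List.pyRange_one_cons (by omega : l < n)]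
      simp only [List.map_cons, List.cons_append, List.take_succ_cons, specW, if_neg hl]
      congr 1
      exact ih n (l + 1) b hn (by omega) (by omega) hnb (by push_cast at hk ⊢; linarith)

lemma foldB : ∀ (k : Nat) (i n base : Int) (out : List (Int × Int × Int)),
    1 ≤ n → 0 ≤ i - base → i - base ≤ n →
    ((PySem.List.pyRange i (i + k) 1).foldl
      (fun (st : Int × Int × List (Int × Int × Int)) (i : Int) =>
        let nb := if i - st.2.1 ≥ st.1 then (st.1 + 1, st.2.1 + st.1) else (st.1, st.2.1)
        (nb.1, nb.2, st.2.2 ++ [(nb.1, i - nb.2, 0)]))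
      (n, base, out)).2.2 = out ++ specW k n (i - base) := by
  intro k
  induction k with
  | zero =>
    intro i n base out _ _ _
    simp [PySem.List.pyRange_one_eq_nil (by push_cast; omega : i + ((0:Nat):Int) ≤ i), specW]
  | succ k ih =>
    intro i n base out hn h0 h1
    rw [PySem.List.pyRange_one_cons (by push_cast; omega : i < i + ((k+1 : Nat) : Int)),
        List.foldl_cons]
    by_cases h : i - base ≥ n
    · have hin : i - base = n := by omega
      simp only [if_pos h]
      have harg : i + ((k + 1 : Nat) : Int) = (i + 1) + ((k : Nat) : Int) := by push_cast; ring
      rw [harg]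
      have := ih (i + 1) (n + 1) (base + n) (out ++ [(n + 1, i - (base + n), 0)])
        (by omega) (by omega) (by omega)
      rw [this, show i + 1 - (base + n) = 1 by omega, show i - (base + n) = 0 by omega]
      simp [specW, hin]
    · simp only [if_neg h]
      have harg : i + ((k + 1 : Nat) : Int) = (i + 1) + ((k : Nat) : Int) := by push_cast; ring
      rw [harg]
      have := ih (i + 1) n base (out ++ [(n, i - base, 0)]) hn (by omega) (by omega)
      rw [this, show i + 1 - base = (i - base) + 1 by omega]
      simp [specW, show ¬ i - base = n by omega]

-- ===== VERDICT (by name: the statement is the Claim_ definition above) =====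
theorem get_hydrogen_states_spec : Claim_equal_get_hydrogen_states := by
  intro m p _
  unfold Spec_get_hydrogen_states
  rw [A_eq_take]
  by_cases hm : m ≤ 0
  · unfold eagerGen get_hydrogen_states_alt
    rw [PySem.List.pyRange_one_eq_nil (by omega : m + 1 ≤ 1)]
    simp [hm]
  · have hm1 : (1:Int) ≤ m := by omega
    cases p with
    | true =>
      rw [genP m hm1]
      unfold get_hydrogen_states_alt
      rw [if_neg hm, if_pos rfl]
      apply List.take_of_length_le
      simp [PySem.List.length_pyRange_one]
      omega
    | false =>
      rw [genF m]
      unfold get_hydrogen_states_alt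
      rw [if_neg hm, if_neg Bool.false_ne_true]
      have hsplit : (PySem.List.pyRange 1 (m + 1) 1).flatMap row
          = (PySem.List.pyRange 0 1 1).map (fun j => ((1:Int), j, (0:Int)))
            ++ (PySem.List.pyRange (1 + 1) (m + 1) 1).flatMap row := by
        rw [PySem.List.pyRange_one_cons (by omega : (1:Int) < m + 1)]
        simp [row]
      rw [hsplit]
      rw [takeSpec m.toNat 1 0 m (by omega) (by omega) (by omega) (by omega)
        (by have hc : ((m.toNat : Int)) = m := by omega
            rw [hc]; nlinarith [sq_nonneg (m - 1)])]
      have hr : PySem.List.pyRange 0 m 1 = PySem.List.pyRange 0 (0 + (m.toNat : Int)) 1 := by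
        congr 1; omega
      rw [hr, foldB m.toNat 0 1 0 [] (by omega) (by omega) (by omega)]
      simp
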